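-- pv_equiv track=rewrite | github.com/shafe123/AoC22 | day10.py | signal_strength
-- ===== SOURCE A (Python) =====
-- def signal_strength(operations):
--     register = 1
--     signals = []
--     counts = []
--     registers = []
--     for count, op in enumerate(operations):
--         if (count + 1 - 20) % 40 == 0:
--             signals.append((count + 1) * register)
--             counts.append(count + 1)
--             registers.append(register)
--
--         if op is None:
--             pass
--         else:
--             register += op
--
--     return signals, counts, registers
-- ===== SOURCE B (Python) =====
-- def signal_strength(operations):
--     # prefix table: cum[k] = register value during cycle k+1 (before applying operations[k])
--     cum = [1]
--     for op in operations:
--         cum.append(cum[-1] + (op if op is not None else 0))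
--     signals = []
--     counts = []
--     registers = []
--     for c in range(20, len(operations) + 1, 40):
--         signals.append(c * cum[c - 1])
--         counts.append(c)
--         registers.append(cum[c - 1])
--     return signals, counts, registers
-- ===== Notes on version B (the rewrite author's own statement) =====
-- stated objective: alternative
-- what changed: Replaces the per-cycle modulo test inside the simulation loop by a prefix table of register values plus a direct stride over the sampled cycles range(20, len(operations)+1, 40).
import Mathlib
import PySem

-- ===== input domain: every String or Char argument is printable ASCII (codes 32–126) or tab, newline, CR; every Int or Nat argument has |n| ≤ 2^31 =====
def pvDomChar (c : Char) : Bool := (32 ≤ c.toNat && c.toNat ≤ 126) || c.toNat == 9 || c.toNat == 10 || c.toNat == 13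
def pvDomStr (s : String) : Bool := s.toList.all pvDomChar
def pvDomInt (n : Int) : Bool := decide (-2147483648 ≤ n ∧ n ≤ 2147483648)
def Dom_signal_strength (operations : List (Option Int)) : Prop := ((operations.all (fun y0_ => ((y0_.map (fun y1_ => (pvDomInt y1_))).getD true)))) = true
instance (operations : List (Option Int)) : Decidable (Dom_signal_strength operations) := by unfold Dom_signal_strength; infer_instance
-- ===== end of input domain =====

-- B replaces the per-cycle modulo test by a prefix table of register values plus a
-- direct stride over the sampled cycles (alternative decomposition, same O(n) cost).


-- ===== PORT A =====
-- loop body of A: state = (register, signals, counts, registers), element = (count, op)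
def stepA (s : Int × List Int × List Int × List Int) (p : Int × Option Int) :
    Int × List Int × List Int × List Int :=
  let register := s.1
  let signals := s.2.1
  let counts := s.2.2.1
  let registers := s.2.2.2
  let count := p.1
  let op := p.2
  let acc :=
    if PySem.Int.mod (count + 1 - 20) 40 = 0 then
      (signals ++ [(count + 1) * register], counts ++ [count + 1], registers ++ [register])
    else
      (signals, counts, registers)
  let register := match op with
    | none => register
    | some v => register + v
  (register, acc)

def signal_strength (operations : List (Option Int)) : List Int × List Int × List Int :=
  let st := (PySem.List.enumerate operations 0).foldl stepA (1, [], [], [])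
  (st.2.1, st.2.2.1, st.2.2.2)

-- ===== PORT B =====
-- cum.append(cum[-1] + (op if op is not None else 0))  (cum is never empty, so cum[-1] is in range)
def cumStep (cum : List Int) (op : Option Int) : List Int :=
  cum ++ [PySem.List.pyGetD cum (-1) 0 + (match op with | none => 0 | some v => v)]

-- loop body of B's sampling loop over range(20, len(operations)+1, 40)
def sampStep (cum : List Int) (s : List Int × List Int × List Int) (c : Int) :
    List Int × List Int × List Int :=
  (s.1 ++ [c * PySem.List.pyGetD cum (c - 1) 0], s.2.1 ++ [c],
   s.2.2 ++ [PySem.List.pyGetD cum (c - 1) 0])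

def signal_strength_alt (operations : List (Option Int)) : List Int × List Int × List Int :=
  let cum := operations.foldl cumStep [1]
  (PySem.List.pyRange 20 (PySem.List.len operations + 1) 40).foldl (sampStep cum) ([], [], [])

-- ===== PRECONDITION & SPEC =====
def Spec_signal_strength (operations : List (Option Int)) (out : List Int × List Int × List Int) : Prop := out = signal_strength_alt operations
instance (operations : List (Option Int)) (out : List Int × List Int × List Int) : Decidable (Spec_signal_strength operations out) := by unfold Spec_signal_strength; infer_instance

-- ===== CLAIM (what is proved, stated in full; the proofs are below) =====
def Claim_equal_signal_strength : Prop := ∀ (operations : List (Option Int)), Dom_signal_strength operations → Spec_signal_strength operations (signal_strength operations)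

-- ===== LEMMAS AND PROOFS =====

-- register increment of one op, and the register value after a prefix of ops
def opVal (op : Option Int) : Int := op.getD 0

def sumv (ops : List (Option Int)) : Int := (ops.map opVal).sum

-- the (cycle, register-before-that-cycle) pairs A samples, starting at count s, register r
def sampleList : List (Option Int) → Int → Int → List (Int × Int)
  | [], _, _ => []
  | op :: t, s, r =>
    (if PySem.Int.mod (s + 1 - 20) 40 = 0 then [(s + 1, r)] else []) ++
      sampleList t (s + 1) (r + opVal op)

theorem sumv_nil : sumv [] = 0 := rfl

theorem sumv_cons (op : Option Int) (t : List (Option Int)) :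
    sumv (op :: t) = opVal op + sumv t := by simp [sumv]

theorem sumv_append (l₁ l₂ : List (Option Int)) :
    sumv (l₁ ++ l₂) = sumv l₁ + sumv l₂ := by simp [sumv]

-- A's fold, in closed form
theorem foldA_closed (ops : List (Option Int)) :
    ∀ (s r : Int) (a1 a2 a3 : List Int),
    (PySem.List.enumerate ops s).foldl stepA (r, a1, a2, a3) =
      (r + sumv ops,
       a1 ++ (sampleList ops s r).map (fun p => p.1 * p.2),
       a2 ++ (sampleList ops s r).map (fun p => p.1),
       a3 ++ (sampleList ops s r).map (fun p => p.2)) := by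
  induction ops with
  | nil => intro s r a1 a2 a3; simp [PySem.List.enumerate_nil, sampleList, sumv_nil]
  | cons op t ih =>
    intro s r a1 a2 a3
    rw [PySem.List.enumerate_cons, List.foldl_cons]
    by_cases h : (40 : Int) ∣ (s + 1 - 20)
    · have hstep : stepA (r, a1, a2, a3) (s, op) =
        (r + opVal op, a1 ++ [(s + 1) * r], a2 ++ [s + 1], a3 ++ [r]) := by
        cases op <;> simp [stepA, h, opVal]
      have hsl : sampleList (op :: t) s r = (s + 1, r) :: sampleList t (s + 1) (r + opVal op) := by
        simp [sampleList, h]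
      rw [hstep, ih, hsl]
      refine Prod.ext ?_ (Prod.ext ?_ (Prod.ext ?_ ?_))
      · show r + opVal op + sumv t = r + sumv (op :: t); rw [sumv_cons]; ring
      · simp
      · simp
      · simp
    · have hstep : stepA (r, a1, a2, a3) (s, op) = (r + opVal op, a1, a2, a3) := by
        cases op <;> simp [stepA, h, opVal]
      have hsl : sampleList (op :: t) s r = sampleList t (s + 1) (r + opVal op) := by
        simp [sampleList, h]
      rw [hstep, ih, hsl]
      refine Prod.ext ?_ rfl
      show r + opVal op + sumv t = r + sumv (op :: t); rw [sumv_cons]; ring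

-- B's prefix list, in closed form
theorem cum_closed (ops : List (Option Int)) :
    ops.foldl cumStep [1] =
      (List.range (ops.length + 1)).map (fun k => 1 + sumv (ops.take k)) := by
  induction ops using List.reverseRecOn with
  | nil => simp [sumv_nil]
  | append_singleton t op ih =>
    rw [List.foldl_append, ih, List.foldl_cons, List.foldl_nil]
    have hne : (List.range (t.length + 1)).map (fun k => 1 + sumv (t.take k)) ≠ [] := by
      simp [List.range_succ]
    have hlast : PySem.List.pyGetD
        ((List.range (t.length + 1)).map (fun k => 1 + sumv (t.take k))) (-1) 0 =
        1 + sumv t := by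
      rw [PySem.List.pyGetD_neg_one _ _ hne]
      rw [List.getLast_eq_getElem]
      simp
    simp only [cumStep]
    rw [hlast]
    have hlen : (t ++ [op]).length = t.length + 1 := by simp
    rw [hlen, List.range_succ (n := t.length + 1), List.map_append]
    congr 1
    · apply List.map_congr_left
      intro k hk
      rw [List.mem_range] at hk
      rw [List.take_append_of_le_length (by omega)]
    · simp only [List.map_cons, List.map_nil]
      rw [← hlen, List.take_length, sumv_append, sumv_cons, sumv_nil]
      cases op <;> simp [opVal, add_assoc]

-- B's sampling fold, in closed form
theorem foldB_closed (cum : List Int) (l : List Int) :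
    ∀ (a1 a2 a3 : List Int),
    l.foldl (sampStep cum) (a1, a2, a3) =
      (a1 ++ l.map (fun c => c * PySem.List.pyGetD cum (c - 1) 0),
       a2 ++ l.map (fun c => c),
       a3 ++ l.map (fun c => PySem.List.pyGetD cum (c - 1) 0)) := by
  induction l with
  | nil => intro a1 a2 a3; simp
  | cons c t ih =>
    intro a1 a2 a3
    rw [List.foldl_cons, sampStep, ih]
    simp

-- A's sample pairs as a filtered range
theorem sampleList_closed (ops : List (Option Int)) :
    ∀ (s r : Int),
    sampleList ops s r =
      ((PySem.List.pyRange (s + 1) (s + 1 + ops.length) 1).filter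
          (fun c => decide (PySem.Int.mod (c - 20) 40 = 0))).map
        (fun c => (c, r + sumv (ops.take (c - s - 1).toNat))) := by
  induction ops with
  | nil =>
    intro s r
    simp [sampleList]
  | cons op t ih =>
    intro s r
    have hcons : PySem.List.pyRange (s + 1) (s + 1 + ((op :: t).length : Int)) 1 =
        (s + 1) :: PySem.List.pyRange (s + 1 + 1) (s + 1 + 1 + (t.length : Int)) 1 := by
      rw [PySem.List.pyRange_one_cons (by simp only [List.length_cons]; omega)]
      have hbb : (s : Int) + 1 + ((op :: t).length : Int) = s + 1 + 1 + (t.length : Int) := by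
        push_cast [List.length_cons]; ring
      rw [hbb]
    rw [hcons, List.filter_cons]
    have htail :
        ((PySem.List.pyRange (s + 1 + 1) (s + 1 + 1 + (t.length : Int)) 1).filter
            (fun c => decide (PySem.Int.mod (c - 20) 40 = 0))).map
          (fun c => (c, r + sumv ((op :: t).take (c - s - 1).toNat))) =
        sampleList t (s + 1) (r + opVal op) := by
      rw [ih (s + 1) (r + opVal op)]
      apply List.map_congr_left
      intro c hc
      have hmem := List.mem_of_mem_filter hc
      rw [PySem.List.mem_pyRange_one] at hmem
      have h1 : (c - s - 1).toNat = (c - (s + 1) - 1).toNat + 1 := by omega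
      rw [h1, List.take_succ_cons, sumv_cons]
      refine Prod.ext rfl ?_
      show r + (opVal op + sumv (t.take (c - (s + 1) - 1).toNat)) =
        r + opVal op + sumv (t.take (c - (s + 1) - 1).toNat)
      ring
    by_cases h : (40 : Int) ∣ (s + 1 - 20)
    · have hd : decide (PySem.Int.mod (s + 1 - 20) 40 = 0) = true := by
        simp [h]
      rw [hd]
      simp only [reduceIte]
      have hsl : sampleList (op :: t) s r = (s + 1, r) :: sampleList t (s + 1) (r + opVal op) := by
        simp [sampleList, h]
      rw [hsl, List.map_cons, ← htail]
      congr 2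
      rw [show ((s : Int) + 1 - s - 1).toNat = 0 by omega, List.take_zero, sumv_nil, add_zero]
    · have hd : decide (PySem.Int.mod (s + 1 - 20) 40 = 0) = false := by
        simp [h]
      rw [hd]
      simp only [Bool.false_eq_true, reduceIte]
      have hsl : sampleList (op :: t) s r = sampleList t (s + 1) (r + opVal op) := by
        simp [sampleList, h]
      rw [hsl, ← htail]

-- the filtered full range of cycles IS the strided range
theorem stride (n : Nat) :
    (PySem.List.pyRange 1 ((n : Int) + 1) 1).filter
        (fun c => decide (PySem.Int.mod (c - 20) 40 = 0)) =
      PySem.List.pyRange 20 ((n : Int) + 1) 40 := by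
  have hsortL : ((PySem.List.pyRange 1 ((n : Int) + 1) 1).filter
      (fun c => decide (PySem.Int.mod (c - 20) 40 = 0))).Pairwise (· < ·) :=
    (PySem.List.pairwise_lt_pyRange_one 1 ((n : Int) + 1)).filter _
  have hsortR : (PySem.List.pyRange 20 ((n : Int) + 1) 40).Pairwise (· < ·) := by
    rw [PySem.List.pyRange_of_pos _ _ (by norm_num)]
    rw [List.pairwise_map]
    exact List.pairwise_lt_range.imp (by intro a b h; omega)
  have hmem : ∀ c : Int,
      (c ∈ (PySem.List.pyRange 1 ((n : Int) + 1) 1).filter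
        (fun c => decide (PySem.Int.mod (c - 20) 40 = 0))) ↔
      c ∈ PySem.List.pyRange 20 ((n : Int) + 1) 40 := by
    intro c
    rw [List.mem_filter, PySem.List.mem_pyRange_one,
      PySem.List.mem_pyRange_iff_of_pos (by norm_num), decide_eq_true_eq,
      PySem.Int.mod_eq_zero_iff_dvd]
    omega
  have hnodL : ((PySem.List.pyRange 1 ((n : Int) + 1) 1).filter
      (fun c => decide (PySem.Int.mod (c - 20) 40 = 0))).Nodup :=
    hsortL.imp (fun h => ne_of_lt h)
  have hnodR : (PySem.List.pyRange 20 ((n : Int) + 1) 40).Nodup :=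
    hsortR.imp (fun h => ne_of_lt h)
  refine List.Perm.eq_of_pairwise (fun a b _ _ h1 h2 => le_antisymm h1 h2) ?_ ?_ ?_
  · exact hsortL.imp (fun h => le_of_lt h)
  · exact hsortR.imp (fun h => le_of_lt h)
  · refine List.perm_of_nodup_nodup_toFinset_eq hnodL hnodR ?_
    ext c
    simp only [List.mem_toFinset]
    exact hmem c

-- reading B's prefix table at index c-1 gives the register before cycle c
theorem cum_read (ops : List (Option Int)) (c : Int) (h1 : 20 ≤ c)
    (h2 : c < (ops.length : Int) + 1) :
    PySem.List.pyGetD (ops.foldl cumStep [1]) (c - 1) 0 =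
      1 + sumv (ops.take (c - 1).toNat) := by
  rw [cum_closed]
  rw [PySem.List.pyGetD_eq_getElem _ _ (by omega) (by simp; omega)]
  rw [List.getElem_map, List.getElem_range]

-- ===== VERDICT (by name: the statement is the Claim_ definition above) =====
theorem signal_strength_spec : Claim_equal_signal_strength := by
  intro ops _
  unfold Spec_signal_strength
  show signal_strength ops = signal_strength_alt ops
  rw [signal_strength, signal_strength_alt]
  rw [foldA_closed ops 0 1 [] [] []]
  rw [foldB_closed]
  rw [sampleList_closed ops 0 1]
  have hb : (0 : Int) + 1 + (ops.length : Int) = (ops.length : Int) + 1 := by ring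
  rw [hb, show (0 : Int) + 1 = 1 from by norm_num, stride ops.length]
  simp only [List.nil_append, List.map_map, PySem.List.len_eq]
  refine Prod.ext ?_ (Prod.ext ?_ ?_)
  · apply List.map_congr_left
    intro c hc
    rw [PySem.List.mem_pyRange_iff_of_pos (by norm_num)] at hc
    simp only [Function.comp]
    rw [cum_read ops c (by omega) (by omega)]
    have : c - 0 - 1 = c - 1 := by ring
    rw [this, mul_comm]
  · apply List.map_congr_left
    intro c hc
    simp [Function.comp]
  · apply List.map_congr_left
    intro c hc
    rw [PySem.List.mem_pyRange_iff_of_pos (by norm_num)] at hc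
    simp only [Function.comp]
    rw [cum_read ops c (by omega) (by omega)]
    have : c - 0 - 1 = c - 1 := by ring
    rw [this]
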